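-- pv_equiv track=rewrite | github.com/Xiaorui-Huang/leetcode | 994.rotting-oranges.py | scan_grid
-- ===== SOURCE A (Python) =====
-- EMPTY = 0
--
-- FRESH = 1
--
-- def scan_grid(grid: list[list[int]]) -> dict[str, list[tuple[int, int]]]:
--     """Scan the orange grid and return the location information of empty, fresh and rotten oranges initial location
--
--     Args:
--         grid (list[list[int]]): grid of fresh/rotten oranges and empty spaces
--
--     Returns:
--         dict[str, list[tuple[int, int]]]: Dictionary containing a list of initial positions for the 3 types of items
--     """
--     rows = len(grid)
--     cols = len(grid[0])
--     locations: dict[str, list[tuple[int, int]]] = {"empty": [], "fresh": [], "rotten": []}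
--
--     for x in range(rows):
--         for y in range(cols):
--             if grid[x][y] == EMPTY:
--                 locations["empty"].append((x, y))
--             elif grid[x][y] == FRESH:
--                 locations["fresh"].append((x, y))
--             else:  # grid[x][y] == 2
--                 locations["rotten"].append((x, y))
--     return locations
-- ===== SOURCE B (Python) =====
-- EMPTY = 0
--
-- FRESH = 1
--
-- def scan_grid(grid: list[list[int]]) -> dict[str, list[tuple[int, int]]]:
--     """Categorize grid cells into empty/fresh/rotten position lists."""
--     rows = len(grid)
--     cols = len(grid[0])
--     cells = [(x, y) for x in range(rows) for y in range(cols)]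
--     return {
--         "empty": [(x, y) for (x, y) in cells if grid[x][y] == EMPTY],
--         "fresh": [(x, y) for (x, y) in cells if grid[x][y] == FRESH],
--         "rotten": [(x, y) for (x, y) in cells if grid[x][y] not in (EMPTY, FRESH)],
--     }
-- ===== Notes on version B (the rewrite author's own statement) =====
-- stated objective: simpler
-- what changed: Replaces the single nested loop that mutates a dict through three branches with a cell list and three independent comprehensions, one per category, building the result dict in one expression.
import Mathlib
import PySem

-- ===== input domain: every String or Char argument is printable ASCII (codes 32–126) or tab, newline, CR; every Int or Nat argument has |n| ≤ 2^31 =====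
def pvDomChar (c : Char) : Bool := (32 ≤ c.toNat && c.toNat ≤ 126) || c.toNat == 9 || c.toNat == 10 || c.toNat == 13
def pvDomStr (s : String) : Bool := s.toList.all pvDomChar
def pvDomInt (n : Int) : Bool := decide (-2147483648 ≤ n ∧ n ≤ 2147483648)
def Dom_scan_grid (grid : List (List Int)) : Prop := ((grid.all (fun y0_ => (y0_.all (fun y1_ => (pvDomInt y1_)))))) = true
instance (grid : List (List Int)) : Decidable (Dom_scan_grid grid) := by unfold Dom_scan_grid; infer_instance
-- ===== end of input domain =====

-- B replaces A's single nested loop with three-branch dict mutation by one cell list and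
-- three independent per-category comprehensions (objective: simpler).

-- ===== PORT A =====
def scan_grid (grid : List (List Int)) : List (String × List (Int × Int)) :=
  let rows : Int := grid.length
  let cols : Int := (PySem.List.pyGetD grid 0 []).length
  let locations : PySem.Dict String (List (Int × Int)) :=
    PySem.Dict.ofList [("empty", []), ("fresh", []), ("rotten", [])]
  let final := (PySem.List.pyRange 0 rows 1).foldl (fun loc x =>
    (PySem.List.pyRange 0 cols 1).foldl (fun loc y =>
      if PySem.List.pyGetD (PySem.List.pyGetD grid x []) y (-1) = 0 then
        loc.modify "empty" [] (fun l => l ++ [(x, y)])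
      else if PySem.List.pyGetD (PySem.List.pyGetD grid x []) y (-1) = 1 then
        loc.modify "fresh" [] (fun l => l ++ [(x, y)])
      else loc.modify "rotten" [] (fun l => l ++ [(x, y)])) loc) locations
  final.items

-- ===== PORT B =====
def scan_grid_alt (grid : List (List Int)) : List (String × List (Int × Int)) :=
  let rows : Int := grid.length
  let cols : Int := (PySem.List.pyGetD grid 0 []).length
  let cells : List (Int × Int) := (PySem.List.pyRange 0 rows 1).flatMap (fun x =>
    (PySem.List.pyRange 0 cols 1).map (fun y => (x, y)))
  let val : Int × Int → Int := fun p =>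
    PySem.List.pyGetD (PySem.List.pyGetD grid p.1 []) p.2 (-1)
  [("empty", cells.filter (fun p => val p = 0)),
   ("fresh", cells.filter (fun p => val p = 1)),
   ("rotten", cells.filter (fun p => val p ≠ 0 ∧ val p ≠ 1))]

-- ===== PRECONDITION & SPEC =====
-- Pre_ excludes exactly the inputs on which A raises IndexError: the empty grid
-- (grid[0]), and grids containing a row shorter than row 0 (grid[x][y]).
def Pre_scan_grid (grid : List (List Int)) : Prop :=
  grid ≠ [] ∧ ∀ row ∈ grid, (grid.headD []).length ≤ row.length
instance (grid : List (List Int)) : Decidable (Pre_scan_grid grid) := by unfold Pre_scan_grid; infer_instance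
def pvWitness_scan_grid : List (List Int) := [[0, 1], [2, 0]]
def Spec_scan_grid (grid : List (List Int)) (out : List (String × List (Int × Int))) : Prop := out = scan_grid_alt grid
instance (grid : List (List Int)) (out : List (String × List (Int × Int))) : Decidable (Spec_scan_grid grid out) := by unfold Spec_scan_grid; infer_instance

-- ===== CLAIM (what is proved, stated in full; the proofs are below) =====
def Claim_equal_scan_grid : Prop := ∀ (grid : List (List Int)), Dom_scan_grid grid → Pre_scan_grid grid → Spec_scan_grid grid (scan_grid grid)

-- ===== LEMMAS AND PROOFS =====

-- nested foldl over two ranges = foldl over the flatMap of cells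
theorem foldl_nested_eq_flatMap {α : Type} (xs : List Int) (ys : Int → List Int)
    (step : α → Int × Int → α) (init : α) :
    xs.foldl (fun a x => (ys x).foldl (fun a y => step a (x, y)) a) init =
    (xs.flatMap (fun x => (ys x).map (fun y => (x, y)))).foldl step init := by
  induction xs generalizing init with
  | nil => rfl
  | cons x xs ih =>
    simp only [List.foldl_cons, List.flatMap_cons, List.foldl_append, List.foldl_map]
    exact ih _

-- loop invariant: folding A's per-cell update over any cell list, starting from the
-- three-entry dict, appends exactly B's three filters
theorem scan_loop_inv (val : Int × Int → Int) (cells : List (Int × Int))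
    (e f r : List (Int × Int)) :
    cells.foldl (fun (loc : PySem.Dict String (List (Int × Int))) p =>
      if val p = 0 then loc.modify "empty" [] (fun l => l ++ [p])
      else if val p = 1 then loc.modify "fresh" [] (fun l => l ++ [p])
      else loc.modify "rotten" [] (fun l => l ++ [p]))
      (PySem.Dict.ofList [("empty", e), ("fresh", f), ("rotten", r)]) =
    PySem.Dict.ofList
      [("empty", e ++ cells.filter (fun p => val p = 0)),
       ("fresh", f ++ cells.filter (fun p => val p = 1)),
       ("rotten", r ++ cells.filter (fun p => val p ≠ 0 ∧ val p ≠ 1))] := by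
  induction cells generalizing e f r with
  | nil => simp
  | cons p cells ih =>
    simp only [List.foldl_cons, List.filter_cons]
    by_cases h0 : val p = 0
    · have hmod : (PySem.Dict.ofList [("empty", e), ("fresh", f), ("rotten", r)]).modify
          "empty" [] (fun l => l ++ [p]) =
          PySem.Dict.ofList [("empty", e ++ [p]), ("fresh", f), ("rotten", r)] := by
        rfl
      simp [h0, hmod, ih]
    · by_cases h1 : val p = 1
      · have hmod : (PySem.Dict.ofList [("empty", e), ("fresh", f), ("rotten", r)]).modify
            "fresh" [] (fun l => l ++ [p]) =
            PySem.Dict.ofList [("empty", e), ("fresh", f ++ [p]), ("rotten", r)] := by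
          rfl
        simp [h1, hmod, ih]
      · have hmod : (PySem.Dict.ofList [("empty", e), ("fresh", f), ("rotten", r)]).modify
            "rotten" [] (fun l => l ++ [p]) =
            PySem.Dict.ofList [("empty", e), ("fresh", f), ("rotten", r ++ [p])] := by
          rfl
        simp [h0, h1, hmod, ih]

-- ===== VERDICT (by name: the statement is the Claim_ definition above) =====
theorem scan_grid_spec : Claim_equal_scan_grid := by
  intro grid _ _
  show scan_grid grid = scan_grid_alt grid
  have key := foldl_nested_eq_flatMap
      (xs := PySem.List.pyRange 0 (grid.length : Int) 1)
      (ys := fun _ => PySem.List.pyRange 0 ((PySem.List.pyGetD grid 0 []).length : Int) 1)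
      (step := fun (loc : PySem.Dict String (List (Int × Int))) (p : Int × Int) =>
        if PySem.List.pyGetD (PySem.List.pyGetD grid p.1 []) p.2 (-1) = 0 then
          loc.modify "empty" [] (fun l => l ++ [p])
        else if PySem.List.pyGetD (PySem.List.pyGetD grid p.1 []) p.2 (-1) = 1 then
          loc.modify "fresh" [] (fun l => l ++ [p])
        else loc.modify "rotten" [] (fun l => l ++ [p]))
      (init := PySem.Dict.ofList [("empty", []), ("fresh", []), ("rotten", [])])
  have inv := scan_loop_inv
      (fun p => PySem.List.pyGetD (PySem.List.pyGetD grid p.1 []) p.2 (-1))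
      ((PySem.List.pyRange 0 (grid.length : Int) 1).flatMap (fun x =>
        (PySem.List.pyRange 0 ((PySem.List.pyGetD grid 0 []).length : Int) 1).map (fun y => (x, y))))
      [] [] []
  calc scan_grid grid
      = (PySem.Dict.ofList
          [("empty", [] ++ (((PySem.List.pyRange 0 (grid.length : Int) 1).flatMap (fun x =>
              (PySem.List.pyRange 0 ((PySem.List.pyGetD grid 0 []).length : Int) 1).map (fun y => (x, y)))).filter
              (fun p => PySem.List.pyGetD (PySem.List.pyGetD grid p.1 []) p.2 (-1) = 0))),
           ("fresh", [] ++ (((PySem.List.pyRange 0 (grid.length : Int) 1).flatMap (fun x =>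
              (PySem.List.pyRange 0 ((PySem.List.pyGetD grid 0 []).length : Int) 1).map (fun y => (x, y)))).filter
              (fun p => PySem.List.pyGetD (PySem.List.pyGetD grid p.1 []) p.2 (-1) = 1))),
           ("rotten", [] ++ (((PySem.List.pyRange 0 (grid.length : Int) 1).flatMap (fun x =>
              (PySem.List.pyRange 0 ((PySem.List.pyGetD grid 0 []).length : Int) 1).map (fun y => (x, y)))).filter
              (fun p => PySem.List.pyGetD (PySem.List.pyGetD grid p.1 []) p.2 (-1) ≠ 0 ∧
                        PySem.List.pyGetD (PySem.List.pyGetD grid p.1 []) p.2 (-1) ≠ 1)))]).items :=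
        congrArg PySem.Dict.items (key.trans inv)
    _ = scan_grid_alt grid := by rfl
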